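-- pv_equiv track=rewrite | github.com/ChanghyunRyu/Python-CodingTest-note | kakao/personality_test/personality_test.py | solution
-- ===== SOURCE A (Python) =====
-- def solution(survey, choices):
--     answer = []
--     personality = {'R': 0, 'T': 0, 'C': 0, 'F': 0, 'J': 0, 'M': 0, 'A': 0, 'N': 0}
--     for i in range(len(choices)):
--         p1, p2 = survey[i]
--         choice = choices[i]
--         if choice <= 3:
--             personality[p1] += 4-choice
--         elif choice >= 5:
--             personality[p2] += choice-4
--     order = ['RT', 'CF', 'JM', 'AN']
--     for i in range(len(order)):
--         o1, o2 = order[i]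
--         if personality[o1] >= personality[o2]:
--             answer.append(o1)
--         else:
--             answer.append(o2)
--     return ''.join(answer)
-- ===== SOURCE B (Python) =====
-- # Per-trait filtered sums: no mutable score table at all; each trait's score is
-- # recomputed as a sum over the matching questions, then axes compare scores.
-- def solution(survey, choices):
--     def low(letter):   # points a choice <= 3 gives to `letter` as a first trait
--         return sum(4 - c for q, c in zip(survey, choices)
--                    if c <= 3 and q[0] == letter)
--
--     def high(letter):  # points a choice >= 5 gives to `letter` as a second trait
--         return sum(c - 4 for q, c in zip(survey, choices)
--                    if c >= 5 and q[1] == letter)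
--
--     def score(letter):
--         return low(letter) + high(letter)
--
--     return ''.join(a if score(a) >= score(b) else b
--                    for a, b in (('R', 'T'), ('C', 'F'), ('J', 'M'), ('A', 'N')))
-- ===== Notes on version B (the rewrite author's own statement) =====
-- stated objective: alternative
-- what changed: B keeps no score table at all: each trait's score is recomputed independently as a filtered sum over the question list (8 scans), whereas A makes one pass mutating an 8-counter dict; the axis winners are then read off the sums.
import Mathlib
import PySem

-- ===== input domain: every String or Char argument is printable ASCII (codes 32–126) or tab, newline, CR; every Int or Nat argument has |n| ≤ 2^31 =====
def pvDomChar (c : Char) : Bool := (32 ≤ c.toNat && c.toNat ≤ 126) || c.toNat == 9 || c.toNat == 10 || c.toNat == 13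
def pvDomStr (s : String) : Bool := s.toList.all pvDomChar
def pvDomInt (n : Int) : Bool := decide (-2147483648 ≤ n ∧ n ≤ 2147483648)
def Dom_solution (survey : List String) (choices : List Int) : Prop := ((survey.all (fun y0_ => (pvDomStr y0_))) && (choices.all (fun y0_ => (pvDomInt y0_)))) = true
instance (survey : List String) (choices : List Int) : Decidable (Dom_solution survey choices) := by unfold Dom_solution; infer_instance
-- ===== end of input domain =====

-- B drops A's mutable 8-counter dict: each trait's score is an independent filtered sum
-- over the question list, and axis winners are read off the sums (objective: alternative).

-- ===== PORT A =====
def pInit : PySem.Dict Char Int :=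
  PySem.Dict.ofList [('R',0),('T',0),('C',0),('F',0),('J',0),('M',0),('A',0),('N',0)]

-- the per-question loop of A: survey[i] unpack raises on non-2-char strings, dict lookup raises on unknown letters
def solLoopA : List String → List Int → PySem.Dict Char Int → Option (PySem.Dict Char Int)
  | _, [], d => some d
  | [], _ :: _, _ => none
  | s :: ss, c :: cs, d =>
    match s.toList with
    | [p1, p2] =>
      if c ≤ 3 then
        match d.get? p1 with
        | none => none
        | some v => solLoopA ss cs (d.insert p1 (v + (4 - c)))
      else if c ≥ 5 then
        match d.get? p2 with
        | none => none
        | some v => solLoopA ss cs (d.insert p2 (v + (c - 4)))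
      else solLoopA ss cs d
    | _ => none

def solution (survey : List String) (choices : List Int) : String :=
  match solLoopA survey choices pInit with
  | none => ""  -- unreachable under Pre_solution (Python raises there)
  | some d =>
    -- getD 0 is exact: all 8 keys are present throughout
    String.ofList (["RT", "CF", "JM", "AN"].foldl (fun ans o =>
      match o.toList with
      | [o1, o2] => ans ++ [if d.getD o1 0 ≥ d.getD o2 0 then o1 else o2]
      | _ => ans) [])

-- ===== PORT B =====
-- sum(4 - c for q, c in zip(survey, choices) if c <= 3 and q[0] == letter), left to right;
-- q[0] is PySem.Str.pyGet? (none = IndexError, only evaluated when c <= 3, as Python short-circuits)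
def sumLow : List (String × Int) → Char → Int → Option Int
  | [], _, acc => some acc
  | (q, c) :: rest, l, acc =>
    if c ≤ 3 then
      match PySem.Str.pyGet? q 0 with
      | none => none
      | some ch => sumLow rest l (if ch = l then acc + (4 - c) else acc)
    else sumLow rest l acc

-- sum(c - 4 for q, c in zip(survey, choices) if c >= 5 and q[1] == letter)
def sumHigh : List (String × Int) → Char → Int → Option Int
  | [], _, acc => some acc
  | (q, c) :: rest, l, acc =>
    if c ≥ 5 then
      match PySem.Str.pyGet? q 1 with
      | none => none
      | some ch => sumHigh rest l (if ch = l then acc + (c - 4) else acc)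
    else sumHigh rest l acc

def scoreB (pairs : List (String × Int)) (l : Char) : Option Int :=
  match sumLow pairs l 0, sumHigh pairs l 0 with
  | some s1, some s2 => some (s1 + s2)
  | _, _ => none

def solution_alt (survey : List String) (choices : List Int) : String :=
  String.ofList ([('R','T'), ('C','F'), ('J','M'), ('A','N')].foldl (fun ans ab =>
    match scoreB (survey.zip choices) ab.1, scoreB (survey.zip choices) ab.2 with
    | some sa, some sb => ans ++ [if sa ≥ sb then ab.1 else ab.2]
    | _, _ => ans)  -- unreachable under Pre_solution (Python raises there)
    [])

-- ===== PRECONDITION & SPEC =====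
def pLetters : List Char := ['R', 'T', 'C', 'F', 'J', 'M', 'A', 'N']

-- Pre_ excludes exactly the inputs where Python A raises: survey shorter than choices (IndexError),
-- an answered question whose string is not 2 chars (unpack ValueError) or whose relevant letter is
-- not one of the 8 personality letters (KeyError).
def Pre_solution (survey : List String) (choices : List Int) : Prop :=
  choices.length ≤ survey.length ∧
  ∀ p ∈ survey.zip choices,
    p.1.toList.length = 2 ∧
    (p.2 ≤ 3 → p.1.toList.getD 0 ' ' ∈ pLetters) ∧
    (5 ≤ p.2 → p.1.toList.getD 1 ' ' ∈ pLetters)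

instance (survey : List String) (choices : List Int) : Decidable (Pre_solution survey choices) := by
  unfold Pre_solution; infer_instance

def pvWitness_solution : List String × List Int := (["TR", "CF", "MJ", "AN"], [7, 1, 3, 5])

def Spec_solution (survey : List String) (choices : List Int) (out : String) : Prop := out = solution_alt survey choices
instance (survey : List String) (choices : List Int) (out : String) : Decidable (Spec_solution survey choices out) := by unfold Spec_solution; infer_instance

-- ===== CLAIM (what is proved, stated in full; the proofs are below) =====
def Claim_equal_solution : Prop := ∀ (survey : List String) (choices : List Int), Dom_solution survey choices → Pre_solution survey choices → Spec_solution survey choices (solution survey choices)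

-- ===== LEMMAS AND PROOFS =====

theorem sumLow_shift (pairs : List (String × Int)) (l : Char) (acc : Int) :
    sumLow pairs l acc = (sumLow pairs l 0).map (acc + ·) := by
  induction pairs generalizing acc with
  | nil => simp [sumLow]
  | cons p rest ih =>
    obtain ⟨q, c⟩ := p
    simp only [sumLow]
    split
    · cases hq : PySem.Str.pyGet? q 0 with
      | none => simp
      | some ch =>
        simp only
        rw [ih, ih (if ch = l then 0 + (4 - c) else 0)]
        cases sumLow rest l 0 <;> split <;> simp <;> ring
    · exact ih acc

theorem sumHigh_shift (pairs : List (String × Int)) (l : Char) (acc : Int) :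
    sumHigh pairs l acc = (sumHigh pairs l 0).map (acc + ·) := by
  induction pairs generalizing acc with
  | nil => simp [sumHigh]
  | cons p rest ih =>
    obtain ⟨q, c⟩ := p
    simp only [sumHigh]
    split
    · cases hq : PySem.Str.pyGet? q 1 with
      | none => simp
      | some ch =>
        simp only
        rw [ih, ih (if ch = l then 0 + (c - 4) else 0)]
        cases sumHigh rest l 0 <;> split <;> simp <;> ring
    · exact ih acc

-- the heart of the proof: A's dict after the loop carries, for each trait letter,
-- exactly the starting value plus B's two filtered sums over the processed questions
theorem main_loop : ∀ (choices : List Int) (survey : List String) (d : PySem.Dict Char Int),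
    choices.length ≤ survey.length →
    (∀ p ∈ survey.zip choices,
      p.1.toList.length = 2 ∧
      (p.2 ≤ 3 → p.1.toList.getD 0 ' ' ∈ pLetters) ∧
      (5 ≤ p.2 → p.1.toList.getD 1 ' ' ∈ pLetters)) →
    (∀ l ∈ pLetters, (d.get? l).isSome) →
    ∃ d', solLoopA survey choices d = some d' ∧
      ∀ l ∈ pLetters, ∃ s1 s2,
        sumLow (survey.zip choices) l 0 = some s1 ∧
        sumHigh (survey.zip choices) l 0 = some s2 ∧
        d'.getD l 0 = d.getD l 0 + s1 + s2 := by
  intro choices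
  induction choices with
  | nil =>
    intro survey d _ _ _
    refine ⟨d, by cases survey <;> rfl, fun l _ => ⟨0, 0, ?_, ?_, by ring⟩⟩ <;>
      cases survey <;> simp [sumLow, sumHigh]
  | cons c cs ih =>
    intro survey d hlen hel hsome
    cases survey with
    | nil => simp at hlen
    | cons s ss =>
      obtain ⟨p1, p2, hs⟩ := List.length_eq_two.mp (hel (s, c) (by simp)).1
      have hlen' : cs.length ≤ ss.length := by simpa using hlen
      have hel' : ∀ p ∈ ss.zip cs,
          p.1.toList.length = 2 ∧
          (p.2 ≤ 3 → p.1.toList.getD 0 ' ' ∈ pLetters) ∧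
          (5 ≤ p.2 → p.1.toList.getD 1 ' ' ∈ pLetters) :=
        fun p hp => hel p (by simp [hp])
      have hq0 : PySem.Str.pyGet? s 0 = some p1 := by simp [PySem.Str.pyGet?, hs]
      have hq1 : PySem.Str.pyGet? s 1 = some p2 := by
        norm_num [PySem.Str.pyGet?, hs, PySem.List.pyGet?, PySem.List.pyIdx?]
      by_cases hc3 : c ≤ 3
      · have hp1 : p1 ∈ pLetters := by
          have := (hel (s, c) (by simp)).2.1 hc3
          simp [hs] at this; simpa using this
        obtain ⟨v, hv⟩ := Option.isSome_iff_exists.mp (hsome p1 hp1)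
        have hg : d.getD p1 0 = v := PySem.Dict.getD_of_get?_eq_some d 0 hv
        have hnot5 : ¬ c ≥ 5 := by omega
        have hsome' : ∀ l ∈ pLetters, ((d.insert p1 (v + (4 - c))).get? l).isSome := by
          intro l hl
          rw [PySem.Dict.get?_insert]
          split
          · simp
          · exact hsome l hl
        obtain ⟨d', hA, hrest⟩ := ih ss (d.insert p1 (v + (4 - c))) hlen' hel' hsome'
        refine ⟨d', ?_, ?_⟩
        · simp [solLoopA, hs, hc3, hv, hA]
        · intro l hl
          obtain ⟨s1, s2, h1, h2, hgd⟩ := hrest l hl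
          refine ⟨(if p1 = l then 4 - c else 0) + s1, s2, ?_, ?_, ?_⟩
          · simp only [List.zip_cons_cons, sumLow, if_pos hc3, hq0]
            rw [sumLow_shift, h1]
            split <;> simp
          · simp only [List.zip_cons_cons, sumHigh, if_neg hnot5]
            exact h2
          · rw [hgd, PySem.Dict.getD_insert]
            by_cases hpl : p1 = l
            · subst hpl; simp [hg]; try ring
            · simp [Ne.symm hpl, hpl]; try ring
      · by_cases hc5 : c ≥ 5
        · have hp2 : p2 ∈ pLetters := by
            have := (hel (s, c) (by simp)).2.2 hc5
            simp [hs] at this; simpa using this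
          obtain ⟨v, hv⟩ := Option.isSome_iff_exists.mp (hsome p2 hp2)
          have hg : d.getD p2 0 = v := PySem.Dict.getD_of_get?_eq_some d 0 hv
          have hsome' : ∀ l ∈ pLetters, ((d.insert p2 (v + (c - 4))).get? l).isSome := by
            intro l hl
            rw [PySem.Dict.get?_insert]
            split
            · simp
            · exact hsome l hl
          obtain ⟨d', hA, hrest⟩ := ih ss (d.insert p2 (v + (c - 4))) hlen' hel' hsome'
          refine ⟨d', ?_, ?_⟩
          · simp [solLoopA, hs, hc3, hc5, hv, hA]
          · intro l hl
            obtain ⟨s1, s2, h1, h2, hgd⟩ := hrest l hl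
            refine ⟨s1, (if p2 = l then c - 4 else 0) + s2, ?_, ?_, ?_⟩
            · simp only [List.zip_cons_cons, sumLow, if_neg hc3]
              exact h1
            · simp only [List.zip_cons_cons, sumHigh, if_pos hc5, hq1]
              rw [sumHigh_shift, h2]
              split <;> simp
            · rw [hgd, PySem.Dict.getD_insert]
              by_cases hpl : p2 = l
              · subst hpl; simp [hg]; try ring
              · simp [Ne.symm hpl, hpl]; try ring
        · obtain ⟨d', hA, hrest⟩ := ih ss d hlen' hel' hsome
          refine ⟨d', by simp [solLoopA, hs, hc3, hc5, hA], ?_⟩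
          intro l hl
          obtain ⟨s1, s2, h1, h2, hgd⟩ := hrest l hl
          exact ⟨s1, s2, by simp [List.zip_cons_cons, sumLow, hc3, h1],
            by simp [List.zip_cons_cons, sumHigh, hc5, h2], hgd⟩

-- ===== VERDICT (by name: the statement is the Claim_ definition above) =====
theorem solution_spec : Claim_equal_solution := by
  intro survey choices _ hpre
  obtain ⟨hlen, hel⟩ := hpre
  have hinit : ∀ l ∈ pLetters, (pInit.get? l).isSome := by intro l hl; fin_cases hl <;> decide
  obtain ⟨d', hA, hrest⟩ := main_loop choices survey pInit hlen hel hinit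
  have hinit0 : ∀ l ∈ pLetters, pInit.getD l 0 = 0 := by intro l hl; fin_cases hl <;> decide
  unfold Spec_solution solution solution_alt
  rw [hA]
  obtain ⟨sR1, sR2, hR1, hR2, hRg⟩ := hrest 'R' (by decide)
  obtain ⟨sT1, sT2, hT1, hT2, hTg⟩ := hrest 'T' (by decide)
  obtain ⟨sC1, sC2, hC1, hC2, hCg⟩ := hrest 'C' (by decide)
  obtain ⟨sF1, sF2, hF1, hF2, hFg⟩ := hrest 'F' (by decide)
  obtain ⟨sJ1, sJ2, hJ1, hJ2, hJg⟩ := hrest 'J' (by decide)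
  obtain ⟨sM1, sM2, hM1, hM2, hMg⟩ := hrest 'M' (by decide)
  obtain ⟨sA1, sA2, hA1, hA2, hAg⟩ := hrest 'A' (by decide)
  obtain ⟨sN1, sN2, hN1, hN2, hNg⟩ := hrest 'N' (by decide)
  simp only [List.foldl, scoreB, hR1, hR2, hC1, hC2, hJ1, hJ2, hA1, hA2,
    hT1, hT2, hF1, hF2, hM1, hM2, hN1, hN2]
  have e1 : ("RT" : String).toList = ['R', 'T'] := by decide
  have e2 : ("CF" : String).toList = ['C', 'F'] := by decide
  have e3 : ("JM" : String).toList = ['J', 'M'] := by decide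
  have e4 : ("AN" : String).toList = ['A', 'N'] := by decide
  simp only [e1, e2, e3, e4, hRg, hTg, hCg, hFg, hJg, hMg, hAg, hNg,
    hinit0 'R' (by decide), hinit0 'T' (by decide), hinit0 'C' (by decide),
    hinit0 'F' (by decide), hinit0 'J' (by decide), hinit0 'M' (by decide),
    hinit0 'A' (by decide), hinit0 'N' (by decide)]
  norm_num
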